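-- pv_equiv track=rewrite | github.com/remdub/sokoban | src/menu.py | _mini_positions
-- ===== SOURCE A (Python) =====
-- def _mini_positions(player_start, box_start, moves):
--     """Return list of (player, box) for each step; index 0 = initial state."""
--     positions = [(player_start, box_start)]
--     p, b = player_start, box_start
--     for dx, dy in moves:
--         np = (p[0] + dx, p[1] + dy)
--         if np == b:
--             b = (b[0] + dx, b[1] + dy)
--         p = np
--         positions.append((p, b))
--     return positions
-- ===== SOURCE B (Python) =====
-- def _mini_positions(player_start, box_start, moves):
--     """Return list of (player, box) for each step; index 0 = initial state.
--
--     Staged computation: first the player's whole trajectory (prefix sums of the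
--     moves, independent of the box), then the box trajectory derived from the
--     player trajectory, then the two are zipped together."""
--     players = [player_start]
--     for dx, dy in moves:
--         x, y = players[-1]
--         players.append((x + dx, y + dy))
--     boxes = [box_start]
--     for p, (dx, dy) in zip(players[1:], moves):
--         b = boxes[-1]
--         boxes.append((b[0] + dx, b[1] + dy) if p == b else b)
--     return list(zip(players, boxes))
-- ===== Notes on version B (the rewrite author's own statement) =====
-- stated objective: alternative
-- what changed: Replaces A's single pass that threads the joint (player, box) state with three staged passes: the player trajectory is computed first on its own (prefix sums of the moves), then the box trajectory is derived from the player trajectory, then the two lists are zipped.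
import Mathlib
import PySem

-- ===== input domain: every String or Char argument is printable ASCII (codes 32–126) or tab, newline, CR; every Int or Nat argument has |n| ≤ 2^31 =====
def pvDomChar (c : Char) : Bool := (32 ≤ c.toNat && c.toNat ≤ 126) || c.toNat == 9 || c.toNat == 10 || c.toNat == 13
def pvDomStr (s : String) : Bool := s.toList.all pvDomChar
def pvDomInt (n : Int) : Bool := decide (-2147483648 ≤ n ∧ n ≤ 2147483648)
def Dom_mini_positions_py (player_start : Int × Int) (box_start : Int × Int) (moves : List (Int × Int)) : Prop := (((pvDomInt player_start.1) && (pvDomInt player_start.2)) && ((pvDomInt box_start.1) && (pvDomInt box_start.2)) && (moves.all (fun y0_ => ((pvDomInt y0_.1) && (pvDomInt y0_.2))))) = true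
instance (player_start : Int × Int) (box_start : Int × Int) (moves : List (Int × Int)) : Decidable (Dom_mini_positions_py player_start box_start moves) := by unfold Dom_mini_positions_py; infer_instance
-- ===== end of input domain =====

-- ===== PORT A =====
-- B recomputes the same per-step (player, box) list in staged passes (player trajectory, then box trajectory, then zip) instead of A's single joint-state loop; same values and cost.
def mini_positions_py (player_start : Int × Int) (box_start : Int × Int) (moves : List (Int × Int)) : List ((Int × Int) × (Int × Int)) :=
  (moves.foldl
    (fun st m =>
      let positions := st.1
      let p := st.2.1
      let b := st.2.2
      let np : Int × Int := (p.1 + m.1, p.2 + m.2)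
      let b' : Int × Int := if np = b then (b.1 + m.1, b.2 + m.2) else b
      (positions ++ [(np, b')], np, b'))
    ([(player_start, box_start)], player_start, box_start)).1

-- ===== PORT B =====
-- pass 1 of B: the player's trajectory alone (prefix sums of the moves), players[-1] as the carried head
def mpPlayers (p : Int × Int) (moves : List (Int × Int)) : List (Int × Int) :=
  match moves with
  | [] => [p]
  | m :: rest => p :: mpPlayers (p.1 + m.1, p.2 + m.2) rest

-- pass 2 of B: the box trajectory, driven by zip(players[1:], moves)
def mpBoxes (b : Int × Int) (pm : List ((Int × Int) × (Int × Int))) : List (Int × Int) :=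
  match pm with
  | [] => [b]
  | (p, m) :: rest => b :: mpBoxes (if p = b then (b.1 + m.1, b.2 + m.2) else b) rest

def mini_positions_py_alt (player_start : Int × Int) (box_start : Int × Int) (moves : List (Int × Int)) : List ((Int × Int) × (Int × Int)) :=
  let players := mpPlayers player_start moves
  let boxes := mpBoxes box_start (players.tail.zip moves)
  players.zip boxes

-- ===== PRECONDITION & SPEC =====
def Spec_mini_positions_py (player_start : Int × Int) (box_start : Int × Int) (moves : List (Int × Int)) (out : List ((Int × Int) × (Int × Int))) : Prop := out = mini_positions_py_alt player_start box_start moves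
instance (player_start : Int × Int) (box_start : Int × Int) (moves : List (Int × Int)) (out : List ((Int × Int) × (Int × Int))) : Decidable (Spec_mini_positions_py player_start box_start moves out) := by unfold Spec_mini_positions_py; infer_instance

-- ===== CLAIM (what is proved, stated in full; the proofs are below) =====
def Claim_equal_mini_positions_py : Prop := ∀ (player_start : Int × Int) (box_start : Int × Int) (moves : List (Int × Int)), Dom_mini_positions_py player_start box_start moves → Spec_mini_positions_py player_start box_start moves (mini_positions_py player_start box_start moves)

-- ===== LEMMAS AND PROOFS =====
theorem mpPlayers_cons (p : Int × Int) (m : Int × Int) (rest : List (Int × Int)) :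
    mpPlayers p (m :: rest) = p :: mpPlayers (p.1 + m.1, p.2 + m.2) rest := rfl

theorem mpPlayers_head (p : Int × Int) (moves : List (Int × Int)) :
    mpPlayers p moves = p :: (mpPlayers p moves).tail := by
  cases moves <;> rfl

theorem alt_nil (p b : Int × Int) : mini_positions_py_alt p b [] = [(p, b)] := rfl

theorem alt_cons (p b m : Int × Int) (rest : List (Int × Int)) :
    mini_positions_py_alt p b (m :: rest) =
      (p, b) :: mini_positions_py_alt (p.1 + m.1, p.2 + m.2)
        (if ((p.1 + m.1, p.2 + m.2) : Int × Int) = b then (b.1 + m.1, b.2 + m.2) else b) rest := by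
  unfold mini_positions_py_alt
  rw [mpPlayers_cons]
  dsimp only [List.tail_cons]
  conv_lhs => rw [mpPlayers_head (p.1 + m.1, p.2 + m.2) rest]
  simp only [List.zip, List.zipWith, mpBoxes]
  rw [← mpPlayers_head]

theorem mini_loop_eq (moves : List (Int × Int)) :
    ∀ (acc : List ((Int × Int) × (Int × Int))) (p b : Int × Int),
    (moves.foldl
      (fun st m =>
        let positions := st.1
        let p := st.2.1
        let b := st.2.2
        let np : Int × Int := (p.1 + m.1, p.2 + m.2)
        let b' : Int × Int := if np = b then (b.1 + m.1, b.2 + m.2) else b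
        (positions ++ [(np, b')], np, b'))
      (acc ++ [(p, b)], p, b)).1 = acc ++ mini_positions_py_alt p b moves := by
  induction moves with
  | nil => intro acc p b; simp [alt_nil]
  | cons m rest ih =>
    intro acc p b
    simp only [List.foldl_cons]
    have h := ih (acc ++ [(p, b)]) (p.1 + m.1, p.2 + m.2)
      (if ((p.1 + m.1, p.2 + m.2) : Int × Int) = b then (b.1 + m.1, b.2 + m.2) else b)
    rw [alt_cons]
    simp only [List.append_assoc] at h ⊢
    simpa using h

-- ===== VERDICT (by name: the statement is the Claim_ definition above) =====
theorem mini_positions_py_spec : Claim_equal_mini_positions_py := by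
  intro p b moves _
  unfold Spec_mini_positions_py mini_positions_py
  have h := mini_loop_eq moves [] p b
  simpa using h
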